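-- pv_equiv track=rewrite | github.com/facebookresearch/MathsFromExamples | src/envs/ode.py | write_int
-- ===== SOURCE A (Python) =====
-- def write_int(val):
--     """
--     Convert a decimal integer to a representation in base 10.
--     """
--     res = []
--     neg = val < 0
--     val = -val if neg else val
--     while True:
--         rem = val % 10
--         val = val // 10
--         res.append(str(rem))
--         if val == 0:
--             break
--     res.append("INT-" if neg else "INT+")
--     return res[::-1]
-- ===== SOURCE B (Python) =====
-- def write_int(val):
--     """
--     Convert a decimal integer to a representation in base 10.
--     """
--     neg = val < 0
--     return ["INT-" if neg else "INT+"] + list(str(-val if neg else val))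
-- ===== Notes on version B (the rewrite author's own statement) =====
-- stated objective: simpler
-- what changed: Replaces the mod/div digit-extraction loop and final reversal with direct digit production via str() on the absolute value, prepending the sign token.
import Mathlib
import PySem

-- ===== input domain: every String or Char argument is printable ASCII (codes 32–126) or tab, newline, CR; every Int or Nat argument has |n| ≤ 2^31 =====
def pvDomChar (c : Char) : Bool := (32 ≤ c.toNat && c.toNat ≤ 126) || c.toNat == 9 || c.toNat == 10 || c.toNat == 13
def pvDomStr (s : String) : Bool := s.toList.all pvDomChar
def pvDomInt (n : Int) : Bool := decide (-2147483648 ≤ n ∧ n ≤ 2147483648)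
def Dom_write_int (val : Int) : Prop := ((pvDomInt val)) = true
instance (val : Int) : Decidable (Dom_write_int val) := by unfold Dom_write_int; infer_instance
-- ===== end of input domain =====

-- B replaces A's mod/div digit-extraction loop (and its final reversal) by taking the
-- digit characters of str(abs(val)) directly and prepending the sign token ("simpler").

-- ===== PORT A =====
-- the while-loop of A; the `val ≤ 0` branch is unreachable in A (val is nonnegative
-- there) and only makes the recursion total
def write_int_loop (val : Int) (res : List String) : List String :=
  let rem := PySem.Int.mod val 10
  let val2 := PySem.Int.floordiv val 10
  let res' := res ++ [PySem.Int.toStr rem]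
  if val2 = 0 then res'
  else if val ≤ 0 then res'
  else write_int_loop val2 res'
termination_by val.toNat
decreasing_by
  rename_i _ hpos
  have hv : val = ((val.toNat : Nat) : Int) := by omega
  have : PySem.Int.floordiv val 10 = ((val.toNat / 10 : Nat) : Int) := by
    rw [hv]; exact_mod_cast PySem.Int.floordiv_natCast val.toNat 10
  rw [this]
  simp only [Int.toNat_natCast]
  exact Nat.div_lt_self (by omega) (by omega)

def write_int (val : Int) : List String :=
  let v := if val < 0 then -val else val
  let res := write_int_loop v []
  -- res.append(sign); return res[::-1]
  (res ++ [if val < 0 then "INT-" else "INT+"]).reverse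

-- ===== PORT B =====
def write_int_alt (val : Int) : List String :=
  (if val < 0 then "INT-" else "INT+") ::
    (PySem.Int.toStr (if val < 0 then -val else val)).toList.map (fun c => String.ofList [c])

-- ===== PRECONDITION & SPEC =====
def Spec_write_int (val : Int) (out : List String) : Prop := out = write_int_alt val
instance (val : Int) (out : List String) : Decidable (Spec_write_int val out) := by unfold Spec_write_int; infer_instance

-- ===== CLAIM (what is proved, stated in full; the proofs are below) =====
def Claim_equal_write_int : Prop := ∀ (val : Int), Dom_write_int val → Spec_write_int val (write_int val)

-- ===== LEMMAS AND PROOFS =====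

lemma toStr_digit (d : Nat) :
    PySem.Int.toStr ((d : Nat) : Int) = String.ofList (Nat.toDigits 10 d) := by
  have h : ¬ ((d : Nat) : Int) < 0 := by omega
  simp [PySem.Int.toStr, PySem.Int.toChars, h]

lemma write_int_loop_eq (m : Nat) (res : List String) :
    write_int_loop ((m : Nat) : Int) res
      = res ++ ((Nat.toDigits 10 m).map (fun c => String.ofList [c])).reverse := by
  induction m using Nat.strong_induction_on generalizing res with
  | _ m ih =>
    rw [write_int_loop]
    have hmod : PySem.Int.mod ((m : Nat) : Int) 10 = ((m % 10 : Nat) : Int) := by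
      exact_mod_cast PySem.Int.mod_natCast m 10
    have hdiv : PySem.Int.floordiv ((m : Nat) : Int) 10 = ((m / 10 : Nat) : Int) := by
      exact_mod_cast PySem.Int.floordiv_natCast m 10
    simp only [hmod, hdiv]
    by_cases h : m / 10 = 0
    · have hm : m < 10 := by omega
      have : ((m / 10 : Nat) : Int) = 0 := by simp [h]
      rw [if_pos this, Nat.mod_eq_of_lt hm, toStr_digit,
        Nat.toDigits_of_lt_base hm]
      rfl
    · have h10 : 10 ≤ m := by
        by_contra hc
        exact h (Nat.div_eq_of_lt (by omega))
      have hne : ¬ ((m / 10 : Nat) : Int) = 0 := by omega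
      have hnp : ¬ ((m : Nat) : Int) ≤ 0 := by omega
      rw [if_neg hne, if_neg hnp,
        ih (m / 10) (Nat.div_lt_self (by omega) (by omega)),
        Nat.toDigits_of_base_le (by omega) h10, toStr_digit,
        Nat.toDigits_of_lt_base (Nat.mod_lt m (by omega))]
      simp

lemma sign_digits (m : Nat) (s : String) :
    (write_int_loop ((m : Nat) : Int) [] ++ [s]).reverse
      = s :: (Nat.toDigits 10 m).map (fun c => String.ofList [c]) := by
  rw [write_int_loop_eq]
  simp

lemma toList_toStr_natCast (m : Nat) :
    (PySem.Int.toStr ((m : Nat) : Int)).toList = Nat.toDigits 10 m := by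
  rw [PySem.Int.toList_toStr, PySem.Int.toChars, if_neg (by omega)]
  rw [Int.toNat_natCast]

lemma write_int_eq_alt (val : Int) : write_int val = write_int_alt val := by
  unfold write_int write_int_alt
  by_cases hv : val < 0
  · simp only [if_pos hv]
    have h : -val = (((-val).toNat : Nat) : Int) := by omega
    rw [h, sign_digits, toList_toStr_natCast]
  · simp only [if_neg hv]
    have h : val = ((val.toNat : Nat) : Int) := by omega
    rw [h, sign_digits, toList_toStr_natCast]

-- ===== VERDICT (by name: the statement is the Claim_ definition above) =====
theorem write_int_spec : Claim_equal_write_int := by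
  intro val _
  unfold Spec_write_int
  exact write_int_eq_alt val
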